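-- pv_equiv track=rewrite | github.com/Arvinds-ds/ed_viz | ed_viz.py | edge_label
-- ===== SOURCE A (Python) =====
-- def edge_label(shape):
--     """
--     Returen texts of graph's edges.
--     @param  shape
--     @return
--     """
--     if len(shape) == 0: return ''
--     if shape[0] is None: label = "?"
--     else: label = "%i" % shape[0]
--     for s in shape[1:]:
--         if s is None: label += "×?"
--         else: label += u"×%i" % s
--     return label
-- ===== SOURCE B (Python) =====
-- def edge_label(shape):
--     return u"\u00d7".join('?' if s is None else '%i' % s for s in shape)
-- ===== Notes on version B (the rewrite author's own statement) =====
-- stated objective: idiomatic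
-- what changed: Replaces A's first-element special case and incremental string accumulation with a uniform per-element formatting comprehension joined by a single '×'.join.
import Mathlib
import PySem

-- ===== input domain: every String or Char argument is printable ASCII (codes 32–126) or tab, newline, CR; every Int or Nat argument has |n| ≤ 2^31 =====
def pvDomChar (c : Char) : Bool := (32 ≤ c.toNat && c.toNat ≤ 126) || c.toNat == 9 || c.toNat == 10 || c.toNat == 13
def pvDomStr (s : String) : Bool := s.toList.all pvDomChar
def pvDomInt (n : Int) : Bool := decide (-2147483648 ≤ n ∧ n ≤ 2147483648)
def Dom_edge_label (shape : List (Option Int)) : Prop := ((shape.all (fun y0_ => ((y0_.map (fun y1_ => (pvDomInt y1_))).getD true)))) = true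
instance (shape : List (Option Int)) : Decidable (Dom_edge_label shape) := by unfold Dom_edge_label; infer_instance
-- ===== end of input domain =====

-- B replaces A's first-element special case and incremental accumulation with a uniform per-element
-- format mapped over the shape and a single '×'-join (idiomatic; same cost).


-- ===== PORT A =====
-- the body of A's for-loop: label += "×?" / label += "×%i" % s
def pvStepA (lab : String) (s : Option Int) : String :=
  match s with
  | none => lab ++ "×?"
  | some n => lab ++ "×" ++ PySem.Int.toStr n

def edge_label (shape : List (Option Int)) : String :=
  if shape.length = 0 then ""
  else
    let label : String :=
      match PySem.List.pyGet? shape 0 with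
      | some none => "?"
      | some (some n) => PySem.Int.toStr n
      | none => ""   -- unreachable: shape nonempty
    (PySem.List.slice shape (some 1) none).foldl pvStepA label

-- ===== PORT B =====
-- the comprehension's expression: '?' if s is None else '%i' % s
def pvFmtB (s : Option Int) : String :=
  match s with
  | none => "?"
  | some n => PySem.Int.toStr n

def edge_label_alt (shape : List (Option Int)) : String :=
  PySem.Str.join "×" (shape.map pvFmtB)

-- ===== PRECONDITION & SPEC =====
def Spec_edge_label (shape : List (Option Int)) (out : String) : Prop := out = edge_label_alt shape
instance (shape : List (Option Int)) (out : String) : Decidable (Spec_edge_label shape out) := by unfold Spec_edge_label; infer_instance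

-- ===== CLAIM (what is proved, stated in full; the proofs are below) =====
def Claim_equal_edge_label : Prop := ∀ (shape : List (Option Int)), Dom_edge_label shape → Spec_edge_label shape (edge_label shape)

-- ===== LEMMAS AND PROOFS =====

-- A's loop, on the character level: it appends '×' ++ fmt s for each element of the tail.
theorem foldl_pvStepA_toList (l : List (Option Int)) (acc : String) :
    (l.foldl pvStepA acc).toList
      = acc.toList ++ (l.map (fun s => '×' :: (pvFmtB s).toList)).flatten := by
  induction l generalizing acc with
  | nil => simp
  | cons y r ih =>
    cases y with
    | none => simp [List.foldl_cons, pvStepA, pvFmtB, ih]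
    | some n => simp [List.foldl_cons, pvStepA, pvFmtB, ih]

-- B's join, on the character level, for a nonempty list of parts.
theorem join_fmt_toList (x : Option Int) (l : List (Option Int)) :
    PySem.Chars.join "×".toList (((x :: l).map pvFmtB).map String.toList)
      = (pvFmtB x).toList ++ (l.map (fun s => '×' :: (pvFmtB s).toList)).flatten := by
  induction l generalizing x with
  | nil => simp [PySem.Chars.join_singleton]
  | cons y r ih =>
    have h := PySem.Chars.join_cons_cons "×".toList (pvFmtB x).toList (pvFmtB y).toList
      ((r.map pvFmtB).map String.toList)
    simp only [List.map_cons] at h ih ⊢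
    rw [h, ih y]
    simp

-- ===== VERDICT (by name: the statement is the Claim_ definition above) =====
theorem edge_label_spec : Claim_equal_edge_label := by
  intro shape _
  unfold Spec_edge_label edge_label edge_label_alt
  cases shape with
  | nil => simp [PySem.Str.join]
  | cons x l =>
    simp only [List.length_cons, Nat.succ_ne_zero, if_false,
      PySem.List.slice_from_one, List.tail_cons]
    apply String.toList_inj.mp
    have hb : (PySem.Str.join "×" ((x :: l).map pvFmtB)).toList
        = PySem.Chars.join "×".toList (((x :: l).map pvFmtB).map String.toList) := by
      simp [PySem.Str.toList_join]
    rw [hb, join_fmt_toList, foldl_pvStepA_toList]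
    cases x <;> simp [PySem.List.pyGet?, PySem.List.pyIdx?, pvFmtB, PySem.Int.toStr]
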